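-- pv_equiv track=rewrite | github.com/Ronald614/EcoLLMDuel | data/nomes_especies.py | obter_nome_exibicao
-- ===== SOURCE A (Python) =====
-- NOMES_COMUNS_ESPECIES = {
--     "Crax globulosa": "Mutum-fava",
--     "Didelphis albiventris": "Gambá-de-orelha-branca",
--     "Leopardus wiedii": "Gato-maracajá",
--     "Panthera onca": "Onça-pintada",
--     "Pauxi tuberosa": "Mutum-cavalo",
--     "Pauxituberosa": "Mutum-cavalo",
--     "Sapajus macrocephalus": "Macaco-prego-de-cabeça-grande",
--     "Sciurus spadiceus": "Esquilo-vermelho-da-Amazônia",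
--     "Tupinambis teguixin": "Teiú-branco",
--     "background": "Esta foto não contém nenhum animal !"
-- }
--
-- def obter_nome_exibicao(especie_raw: str, incluir_cientifico: bool = False) -> str:
--     # Casos especiais de erro
--     if especie_raw == "erro_ou_desconhecido":
--         return "Erro (Inventou Especie)"
--     if especie_raw == "erro_formatacao":
--         return "Erro (Formato Invalido)"
--
--     nome_comum = especie_raw
--     cientifico_formatado = especie_raw
--
--     for chave, valor in NOMES_COMUNS_ESPECIES.items():
--         if chave.replace(" ", "").lower() == especie_raw.replace(" ", "").lower():
--             nome_comum = valor
--             cientifico_formatado = chave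
--             break
--
--     if incluir_cientifico and nome_comum != cientifico_formatado:
--         return f"{nome_comum} ({cientifico_formatado})"
--
--     return nome_comum
-- ===== SOURCE B (Python) =====
-- NOMES_COMUNS_ESPECIES = {
--     "Crax globulosa": "Mutum-fava",
--     "Didelphis albiventris": "Gambá-de-orelha-branca",
--     "Leopardus wiedii": "Gato-maracajá",
--     "Panthera onca": "Onça-pintada",
--     "Pauxi tuberosa": "Mutum-cavalo",
--     "Pauxituberosa": "Mutum-cavalo",
--     "Sapajus macrocephalus": "Macaco-prego-de-cabeça-grande",
--     "Sciurus spadiceus": "Esquilo-vermelho-da-Amazônia",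
--     "Tupinambis teguixin": "Teiú-branco",
--     "background": "Esta foto não contém nenhum animal !"
-- }
--
-- # Fully materialized answer table: for every normalized species name we store BOTH
-- # final display strings (plain, with-scientific), so no comparison or formatting
-- # happens at call time.  The first occurrence wins on the normalized-name
-- # collision "Pauxi tuberosa"/"Pauxituberosa" (hence "Mutum-cavalo (Pauxi tuberosa)").
-- _DISPLAY = {
--     "craxglobulosa": ("Mutum-fava", "Mutum-fava (Crax globulosa)"),
--     "didelphisalbiventris": ("Gambá-de-orelha-branca", "Gambá-de-orelha-branca (Didelphis albiventris)"),
--     "leoparduswiedii": ("Gato-maracajá", "Gato-maracajá (Leopardus wiedii)"),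
--     "pantheraonca": ("Onça-pintada", "Onça-pintada (Panthera onca)"),
--     "pauxituberosa": ("Mutum-cavalo", "Mutum-cavalo (Pauxi tuberosa)"),
--     "sapajusmacrocephalus": ("Macaco-prego-de-cabeça-grande", "Macaco-prego-de-cabeça-grande (Sapajus macrocephalus)"),
--     "sciurusspadiceus": ("Esquilo-vermelho-da-Amazônia", "Esquilo-vermelho-da-Amazônia (Sciurus spadiceus)"),
--     "tupinambisteguixin": ("Teiú-branco", "Teiú-branco (Tupinambis teguixin)"),
--     "background": ("Esta foto não contém nenhum animal !", "Esta foto não contém nenhum animal ! (background)"),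
-- }
--
--
-- def obter_nome_exibicao(especie_raw: str, incluir_cientifico: bool = False) -> str:
--     if especie_raw == "erro_ou_desconhecido":
--         return "Erro (Inventou Especie)"
--     if especie_raw == "erro_formatacao":
--         return "Erro (Formato Invalido)"
--
--     p = _DISPLAY.get(especie_raw.replace(" ", "").lower())
--     if p is None:
--         p = (especie_raw, especie_raw)
--     return p[1] if incluir_cientifico else p[0]
-- ===== Notes on version B (the rewrite author's own statement) =====
-- stated objective: alternative
-- what changed: Replaces A's per-call linear scan with per-key normalization plus a runtime equality test and f-string formatting by a fully materialized answer table: every normalized name maps directly to both ready-made display strings, so a call is one normalization, one lookup and a boolean pick.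
import Mathlib
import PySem

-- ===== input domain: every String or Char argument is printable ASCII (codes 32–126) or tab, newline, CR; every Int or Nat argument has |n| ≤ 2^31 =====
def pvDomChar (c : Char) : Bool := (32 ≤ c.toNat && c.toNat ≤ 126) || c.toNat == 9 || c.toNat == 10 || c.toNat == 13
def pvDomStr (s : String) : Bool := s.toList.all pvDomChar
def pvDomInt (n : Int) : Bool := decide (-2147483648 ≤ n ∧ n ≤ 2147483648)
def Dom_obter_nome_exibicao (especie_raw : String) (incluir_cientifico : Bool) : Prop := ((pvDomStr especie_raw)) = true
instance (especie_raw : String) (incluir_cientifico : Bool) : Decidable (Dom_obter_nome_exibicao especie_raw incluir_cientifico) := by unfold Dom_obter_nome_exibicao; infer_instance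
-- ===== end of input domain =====

-- B replaces A's per-call scan (normalizing every key, comparing, then formatting) by a fully
-- materialized answer table mapping each normalized name to both ready-made display strings.

-- ===== PORT A =====
def nomesComunsEspecies : PySem.Dict String String := PySem.Dict.ofList
  [("Crax globulosa", "Mutum-fava"),
   ("Didelphis albiventris", "Gambá-de-orelha-branca"),
   ("Leopardus wiedii", "Gato-maracajá"),
   ("Panthera onca", "Onça-pintada"),
   ("Pauxi tuberosa", "Mutum-cavalo"),
   ("Pauxituberosa", "Mutum-cavalo"),
   ("Sapajus macrocephalus", "Macaco-prego-de-cabeça-grande"),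
   ("Sciurus spadiceus", "Esquilo-vermelho-da-Amazônia"),
   ("Tupinambis teguixin", "Teiú-branco"),
   ("background", "Esta foto não contém nenhum animal !")]

-- the `for … break` loop of A: first matching entry wins, else keep the initial values
def aScan (especie_raw : String) : List (String × String) → String × String
  | [] => (especie_raw, especie_raw)
  | (chave, valor) :: rest =>
    if PySem.Str.lower (PySem.Str.replace chave " " "") ==
       PySem.Str.lower (PySem.Str.replace especie_raw " " "") then (valor, chave)
    else aScan especie_raw rest

def obter_nome_exibicao (especie_raw : String) (incluir_cientifico : Bool) : String :=
  if especie_raw == "erro_ou_desconhecido" then "Erro (Inventou Especie)"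
  else if especie_raw == "erro_formatacao" then "Erro (Formato Invalido)"
  else
    let r := aScan especie_raw nomesComunsEspecies.items
    let nome_comum := r.1
    let cientifico_formatado := r.2
    if incluir_cientifico && !(nome_comum == cientifico_formatado) then
      nome_comum ++ " (" ++ cientifico_formatado ++ ")"
    else nome_comum

-- ===== PORT B =====
-- static answer table: normalized name -> (plain display, display with scientific name);
-- first occurrence wins on the "pauxituberosa" collision
def displayTable : PySem.Dict String (String × String) := PySem.Dict.ofList
  [("craxglobulosa", ("Mutum-fava", "Mutum-fava (Crax globulosa)")),
   ("didelphisalbiventris", ("Gambá-de-orelha-branca", "Gambá-de-orelha-branca (Didelphis albiventris)")),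
   ("leoparduswiedii", ("Gato-maracajá", "Gato-maracajá (Leopardus wiedii)")),
   ("pantheraonca", ("Onça-pintada", "Onça-pintada (Panthera onca)")),
   ("pauxituberosa", ("Mutum-cavalo", "Mutum-cavalo (Pauxi tuberosa)")),
   ("sapajusmacrocephalus", ("Macaco-prego-de-cabeça-grande", "Macaco-prego-de-cabeça-grande (Sapajus macrocephalus)")),
   ("sciurusspadiceus", ("Esquilo-vermelho-da-Amazônia", "Esquilo-vermelho-da-Amazônia (Sciurus spadiceus)")),
   ("tupinambisteguixin", ("Teiú-branco", "Teiú-branco (Tupinambis teguixin)")),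
   ("background", ("Esta foto não contém nenhum animal !", "Esta foto não contém nenhum animal ! (background)"))]

def obter_nome_exibicao_alt (especie_raw : String) (incluir_cientifico : Bool) : String :=
  if especie_raw == "erro_ou_desconhecido" then "Erro (Inventou Especie)"
  else if especie_raw == "erro_formatacao" then "Erro (Formato Invalido)"
  else
    let p := match displayTable.get? (PySem.Str.lower (PySem.Str.replace especie_raw " " "")) with
      | none => (especie_raw, especie_raw)
      | some q => q
    if incluir_cientifico then p.2 else p.1

-- ===== PRECONDITION & SPEC =====
def Spec_obter_nome_exibicao (especie_raw : String) (incluir_cientifico : Bool) (out : String) : Prop := out = obter_nome_exibicao_alt especie_raw incluir_cientifico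
instance (especie_raw : String) (incluir_cientifico : Bool) (out : String) : Decidable (Spec_obter_nome_exibicao especie_raw incluir_cientifico out) := by unfold Spec_obter_nome_exibicao; infer_instance

-- ===== CLAIM =====
def Claim_equal_obter_nome_exibicao : Prop := ∀ (especie_raw : String) (incluir_cientifico : Bool), Dom_obter_nome_exibicao especie_raw incluir_cientifico → Spec_obter_nome_exibicao especie_raw incluir_cientifico (obter_nome_exibicao especie_raw incluir_cientifico)

-- ===== LEMMAS AND PROOFS =====

-- the first entry of L whose normalized key equals t, as an Option (proof-side helper)
def firstMatch (t : String) : List (String × String) → Option (String × String)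
  | [] => none
  | (chave, valor) :: rest =>
    if PySem.Str.lower (PySem.Str.replace chave " " "") == t then some (valor, chave)
    else firstMatch t rest

-- A's break-loop is firstMatch with the default (s, s)
lemma aScan_eq_firstMatch (s : String) (L : List (String × String)) :
    aScan s L =
      (match firstMatch (PySem.Str.lower (PySem.Str.replace s " " "")) L with
        | none => (s, s)
        | some p => p) := by
  induction L with
  | nil => simp [aScan, firstMatch]
  | cons kv rest ih =>
    obtain ⟨chave, valor⟩ := kv
    simp only [aScan, firstMatch]
    by_cases h : (PySem.Str.lower (PySem.Str.replace chave " " "") ==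
        PySem.Str.lower (PySem.Str.replace s " " "")) = true
    · simp [h]
    · simp only [Bool.not_eq_true] at h
      simp [h, ih]

-- on a missed key both the scan and the answer table come up empty
lemma miss_case (t : String)
    (h1 : t ≠ "craxglobulosa") (h2 : t ≠ "didelphisalbiventris")
    (h3 : t ≠ "leoparduswiedii") (h4 : t ≠ "pantheraonca")
    (h5 : t ≠ "pauxituberosa") (h6 : t ≠ "sapajusmacrocephalus")
    (h7 : t ≠ "sciurusspadiceus") (h8 : t ≠ "tupinambisteguixin")
    (h9 : t ≠ "background") :
    firstMatch t nomesComunsEspecies.items = none ∧ displayTable.get? t = none := by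
  have hitems : nomesComunsEspecies.items =
      [("Crax globulosa", "Mutum-fava"), ("Didelphis albiventris", "Gambá-de-orelha-branca"),
       ("Leopardus wiedii", "Gato-maracajá"), ("Panthera onca", "Onça-pintada"),
       ("Pauxi tuberosa", "Mutum-cavalo"), ("Pauxituberosa", "Mutum-cavalo"),
       ("Sapajus macrocephalus", "Macaco-prego-de-cabeça-grande"),
       ("Sciurus spadiceus", "Esquilo-vermelho-da-Amazônia"),
       ("Tupinambis teguixin", "Teiú-branco"),
       ("background", "Esta foto não contém nenhum animal !")] := by decide
  have hd : displayTable = PySem.Dict.mk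
      [("craxglobulosa", ("Mutum-fava", "Mutum-fava (Crax globulosa)")),
       ("didelphisalbiventris", ("Gambá-de-orelha-branca", "Gambá-de-orelha-branca (Didelphis albiventris)")),
       ("leoparduswiedii", ("Gato-maracajá", "Gato-maracajá (Leopardus wiedii)")),
       ("pantheraonca", ("Onça-pintada", "Onça-pintada (Panthera onca)")),
       ("pauxituberosa", ("Mutum-cavalo", "Mutum-cavalo (Pauxi tuberosa)")),
       ("sapajusmacrocephalus", ("Macaco-prego-de-cabeça-grande", "Macaco-prego-de-cabeça-grande (Sapajus macrocephalus)")),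
       ("sciurusspadiceus", ("Esquilo-vermelho-da-Amazônia", "Esquilo-vermelho-da-Amazônia (Sciurus spadiceus)")),
       ("tupinambisteguixin", ("Teiú-branco", "Teiú-branco (Tupinambis teguixin)")),
       ("background", ("Esta foto não contém nenhum animal !", "Esta foto não contém nenhum animal ! (background)"))] := by
    decide
  have n1 : PySem.Str.lower (PySem.Str.replace "Crax globulosa" " " "") = "craxglobulosa" := by decide
  have n2 : PySem.Str.lower (PySem.Str.replace "Didelphis albiventris" " " "") = "didelphisalbiventris" := by decide
  have n3 : PySem.Str.lower (PySem.Str.replace "Leopardus wiedii" " " "") = "leoparduswiedii" := by decide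
  have n4 : PySem.Str.lower (PySem.Str.replace "Panthera onca" " " "") = "pantheraonca" := by decide
  have n5 : PySem.Str.lower (PySem.Str.replace "Pauxi tuberosa" " " "") = "pauxituberosa" := by decide
  have n5' : PySem.Str.lower (PySem.Str.replace "Pauxituberosa" " " "") = "pauxituberosa" := by decide
  have n6 : PySem.Str.lower (PySem.Str.replace "Sapajus macrocephalus" " " "") = "sapajusmacrocephalus" := by decide
  have n7 : PySem.Str.lower (PySem.Str.replace "Sciurus spadiceus" " " "") = "sciurusspadiceus" := by decide
  have n8 : PySem.Str.lower (PySem.Str.replace "Tupinambis teguixin" " " "") = "tupinambisteguixin" := by decide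
  have n9 : PySem.Str.lower (PySem.Str.replace "background" " " "") = "background" := by decide
  constructor
  · rw [hitems]
    simp [firstMatch, n1, n2, n3, n4, n5, n5', n6, n7, n8, n9,
      Ne.symm h1, Ne.symm h2, Ne.symm h3, Ne.symm h4, Ne.symm h5,
      Ne.symm h6, Ne.symm h7, Ne.symm h8, Ne.symm h9]
  · rw [hd]
    simp [PySem.Dict.get?,
      Ne.symm h1, Ne.symm h2, Ne.symm h3, Ne.symm h4, Ne.symm h5,
      Ne.symm h6, Ne.symm h7, Ne.symm h8, Ne.symm h9]

-- ===== VERDICT =====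
theorem obter_nome_exibicao_spec : Claim_equal_obter_nome_exibicao := by
  intro s inc _
  unfold Spec_obter_nome_exibicao obter_nome_exibicao obter_nome_exibicao_alt
  by_cases e1 : (s == "erro_ou_desconhecido") = true
  · simp [e1]
  by_cases e2 : (s == "erro_formatacao") = true
  · simp [e1, e2]
  simp only [e1, e2, Bool.false_eq_true, if_false]
  rw [aScan_eq_firstMatch]
  by_cases h1 : PySem.Str.lower (PySem.Str.replace s " " "") = "craxglobulosa"
  · rw [h1]
    have fm : firstMatch "craxglobulosa" nomesComunsEspecies.items =
        some ("Mutum-fava", "Crax globulosa") := by decide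
    have gd : displayTable.get? "craxglobulosa" =
        some ("Mutum-fava", "Mutum-fava (Crax globulosa)") := by decide
    rw [fm, gd]; cases inc <;> rfl
  by_cases h2 : PySem.Str.lower (PySem.Str.replace s " " "") = "didelphisalbiventris"
  · rw [h2]
    have fm : firstMatch "didelphisalbiventris" nomesComunsEspecies.items =
        some ("Gambá-de-orelha-branca", "Didelphis albiventris") := by decide
    have gd : displayTable.get? "didelphisalbiventris" =
        some ("Gambá-de-orelha-branca", "Gambá-de-orelha-branca (Didelphis albiventris)") := by decide
    rw [fm, gd]; cases inc <;> rfl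
  by_cases h3 : PySem.Str.lower (PySem.Str.replace s " " "") = "leoparduswiedii"
  · rw [h3]
    have fm : firstMatch "leoparduswiedii" nomesComunsEspecies.items =
        some ("Gato-maracajá", "Leopardus wiedii") := by decide
    have gd : displayTable.get? "leoparduswiedii" =
        some ("Gato-maracajá", "Gato-maracajá (Leopardus wiedii)") := by decide
    rw [fm, gd]; cases inc <;> rfl
  by_cases h4 : PySem.Str.lower (PySem.Str.replace s " " "") = "pantheraonca"
  · rw [h4]
    have fm : firstMatch "pantheraonca" nomesComunsEspecies.items =
        some ("Onça-pintada", "Panthera onca") := by decide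
    have gd : displayTable.get? "pantheraonca" =
        some ("Onça-pintada", "Onça-pintada (Panthera onca)") := by decide
    rw [fm, gd]; cases inc <;> rfl
  by_cases h5 : PySem.Str.lower (PySem.Str.replace s " " "") = "pauxituberosa"
  · rw [h5]
    have fm : firstMatch "pauxituberosa" nomesComunsEspecies.items =
        some ("Mutum-cavalo", "Pauxi tuberosa") := by decide
    have gd : displayTable.get? "pauxituberosa" =
        some ("Mutum-cavalo", "Mutum-cavalo (Pauxi tuberosa)") := by decide
    rw [fm, gd]; cases inc <;> rfl
  by_cases h6 : PySem.Str.lower (PySem.Str.replace s " " "") = "sapajusmacrocephalus"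
  · rw [h6]
    have fm : firstMatch "sapajusmacrocephalus" nomesComunsEspecies.items =
        some ("Macaco-prego-de-cabeça-grande", "Sapajus macrocephalus") := by decide
    have gd : displayTable.get? "sapajusmacrocephalus" =
        some ("Macaco-prego-de-cabeça-grande", "Macaco-prego-de-cabeça-grande (Sapajus macrocephalus)") := by decide
    rw [fm, gd]; cases inc <;> rfl
  by_cases h7 : PySem.Str.lower (PySem.Str.replace s " " "") = "sciurusspadiceus"
  · rw [h7]
    have fm : firstMatch "sciurusspadiceus" nomesComunsEspecies.items =
        some ("Esquilo-vermelho-da-Amazônia", "Sciurus spadiceus") := by decide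
    have gd : displayTable.get? "sciurusspadiceus" =
        some ("Esquilo-vermelho-da-Amazônia", "Esquilo-vermelho-da-Amazônia (Sciurus spadiceus)") := by decide
    rw [fm, gd]; cases inc <;> rfl
  by_cases h8 : PySem.Str.lower (PySem.Str.replace s " " "") = "tupinambisteguixin"
  · rw [h8]
    have fm : firstMatch "tupinambisteguixin" nomesComunsEspecies.items =
        some ("Teiú-branco", "Tupinambis teguixin") := by decide
    have gd : displayTable.get? "tupinambisteguixin" =
        some ("Teiú-branco", "Teiú-branco (Tupinambis teguixin)") := by decide
    rw [fm, gd]; cases inc <;> rfl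
  by_cases h9 : PySem.Str.lower (PySem.Str.replace s " " "") = "background"
  · rw [h9]
    have fm : firstMatch "background" nomesComunsEspecies.items =
        some ("Esta foto não contém nenhum animal !", "background") := by decide
    have gd : displayTable.get? "background" =
        some ("Esta foto não contém nenhum animal !", "Esta foto não contém nenhum animal ! (background)") := by decide
    rw [fm, gd]; cases inc <;> rfl
  obtain ⟨hf, hg⟩ := miss_case _ h1 h2 h3 h4 h5 h6 h7 h8 h9
  rw [hf, hg]
  cases inc <;> simp
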